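-- pv_equiv track=rewrite | github.com/shenxiaoxu/leetcode | questions/1938. Maximum Genetic Difference Query/maxim.py | maxGeneticDifference
-- ===== SOURCE A (Python) =====
-- from typing import List
--
-- class TrieNode:
--     def __init__(self):
--         self.children = {}
--         self.go = 0#num of ele going through this node
--     def increase(self, number, d):
--         cur = self
--         for i in range(17,-1,-1):
--             bit = (number >> i)&1
--             if bit not in cur.children: cur.children[bit] = TrieNode()
--             cur = cur.children[bit]
--             cur.go += d
--     def getMax(self, number):
--         cur = self
--         ans = 0
--         for i in range(17,-1,-1):
--             bit = (number >> i)&1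
--             if 1 - bit in cur.children and cur.children[1-bit].go > 0:
--                 cur = cur.children[1 - bit]
--                 ans = (1 << i)|ans
--             else:
--                 cur = cur.children[bit]
--         return ans
--
-- def maxGeneticDifference(parents: List[int], queries: List[List[int]]) -> List[int]:
--     n = len(parents)
--     m = len(queries)
--     res = [0]*m
--     graph = [[] for _ in range(n)]
--     queryByNode = [[] for _ in range(n)]
--     root = -1
--     trieNode = TrieNode()
--     for i, p in enumerate(parents):
--         if p == -1:
--             root = i
--         else:
--             graph[p].append(i)
--     for i, q in enumerate(queries):
--         queryByNode[q[0]].append([q[1], i])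
--
--     def dfs(u):
--         trieNode.increase(u, 1)
--         for val, idx in queryByNode[u]:
--             res[idx] = trieNode.getMax(val)
--         for v in graph[u]:
--             dfs(v)
--         trieNode.increase(u, -1)
--     dfs(root)
--     return res
-- ===== SOURCE B (Python) =====
-- from typing import List
--
-- MASK = (1 << 18) - 1  # answers are taken over the low 18 bits, as in the trie version
--
-- def maxGeneticDifference(parents: List[int], queries: List[List[int]]) -> List[int]:
--     # No trie: walk the tree once keeping the explicit list of ancestors of the
--     # current node (nearest first); each query is answered by a direct scan of
--     # that list, taking the maximum of (val ^ ancestor) & MASK.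
--     n = len(parents)
--     m = len(queries)
--     res = [0] * m
--     graph = [[] for _ in range(n)]
--     queryByNode = [[] for _ in range(n)]
--     root = -1
--     for i, p in enumerate(parents):
--         if p == -1:
--             root = i
--         else:
--             graph[p].append(i)
--     for i, q in enumerate(queries):
--         queryByNode[q[0]].append((q[1], i))
--
--     def dfs(u, anc):
--         anc = [u] + anc
--         for val, idx in queryByNode[u]:
--             res[idx] = max((val ^ a) & MASK for a in anc)
--         for v in graph[u]:
--             dfs(v, anc)
--     dfs(root, [])
--     return res
-- ===== Notes on version B (the rewrite author's own statement) =====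
-- stated objective: alternative
-- what changed: B drops the XOR trie entirely: the DFS passes down an explicit list of ancestors of the current node and answers each query by scanning that list for the maximum of (val ^ ancestor) & 0x3FFFF, instead of maintaining a bitwise trie with insert-on-enter/remove-on-exit and greedy getMax.
import Mathlib
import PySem

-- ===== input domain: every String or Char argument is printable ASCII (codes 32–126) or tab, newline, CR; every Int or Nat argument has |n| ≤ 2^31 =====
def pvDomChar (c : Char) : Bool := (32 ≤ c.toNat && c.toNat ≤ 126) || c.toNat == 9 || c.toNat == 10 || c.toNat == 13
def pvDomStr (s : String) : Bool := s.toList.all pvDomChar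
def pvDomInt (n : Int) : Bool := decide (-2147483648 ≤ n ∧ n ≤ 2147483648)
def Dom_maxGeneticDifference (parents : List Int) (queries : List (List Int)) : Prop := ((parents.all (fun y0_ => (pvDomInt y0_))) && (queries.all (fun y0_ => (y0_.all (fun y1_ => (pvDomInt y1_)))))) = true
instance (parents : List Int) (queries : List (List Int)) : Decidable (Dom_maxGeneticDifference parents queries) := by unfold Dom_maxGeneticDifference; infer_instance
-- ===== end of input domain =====

-- B drops A's XOR trie entirely: its DFS passes down the explicit ancestor list and
-- answers each query by a direct scan for max((val ^ ancestor) & 0x3FFFF);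
-- objective: alternative algorithm (no trie, no remove-on-exit), no speed claim.

-- ===== PORT A =====

-- TrieNode: children = {} with keys 0/1 and a counter `go`; a missing child is
-- modelled as `nil` (go = 0).  Not a nested inductive: two explicit child slots.
inductive PyTrie where
  | nil : PyTrie
  | node : Int → PyTrie → PyTrie → PyTrie
deriving DecidableEq, Repr

def PyTrie.go : PyTrie → Int
  | .nil => 0
  | .node g _ _ => g

def PyTrie.child : PyTrie → Bool → PyTrie
  | .nil, _ => .nil
  | .node _ c0 _, false => c0
  | .node _ _ c1, true => c1

def PyTrie.withChild : PyTrie → Bool → PyTrie → PyTrie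
  | .nil, false, c => .node 0 c .nil
  | .nil, true, c => .node 0 .nil c
  | .node g _ c1, false, c => .node g c c1
  | .node g c0 _, true, c => .node g c0 c

-- `if bit not in cur.children: cur.children[bit] = TrieNode()` followed by `cur.go += d`
def PyTrie.addGo : PyTrie → Int → PyTrie
  | .nil, d => .node d .nil .nil
  | .node g c0 c1, d => .node (g + d) c0 c1

-- bit = (number >> k) & 1   (Python arithmetic shift = floor division by 2^k)
def pyBit (number : Int) (k : Nat) : Bool :=
  PySem.Int.band (PySem.Int.floordiv number ((2 : Int) ^ k)) 1 == 1

-- TrieNode.increase: the loop `for i in range(17,-1,-1)` as recursion on the number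
-- of remaining bit positions (k+1 handles bit index k; the first call uses 18).
def PyTrie.increase (number d : Int) : Nat → PyTrie → PyTrie
  | 0, t => t
  | k+1, t =>
    let b := pyBit number k
    t.withChild b (PyTrie.increase number d k ((t.child b).addGo d))

-- TrieNode.getMax with the running accumulator `ans`.  `1 - bit in cur.children and
-- cur.children[1-bit].go > 0` is ported as `go > 0` alone (a missing child has go = 0);
-- `ans = (1 << i) | ans` is ported as `2^i + ans` (ans only carries bits above i, so the
-- OR sets a fresh bit); in the else branch Python indexes children[bit], which exists on
-- every state in which A calls getMax (the queried node itself is in the trie) — the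
-- port simply descends into `nil` there and is exact on all executed states.
def PyTrie.getMaxAux (number : Int) : Nat → PyTrie → Int → Int
  | 0, _, ans => ans
  | k+1, t, ans =>
    let b := pyBit number k
    if (t.child (!b)).go > 0 then
      PyTrie.getMaxAux number k (t.child (!b)) ((2 : Int) ^ k + ans)
    else
      PyTrie.getMaxAux number k (t.child b) ans

def PyTrie.getMax (number : Int) (t : PyTrie) : Int := PyTrie.getMaxAux number 18 t 0

-- Python's negative list index wraps: xs[i] = xs[i + len] for -len <= i < 0
def pvWrap (n : Nat) (p : Int) : Nat := (if p < 0 then p + n else p).toNat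

-- the two setup loops (identical lines in Source A and Source B, hence shared by the ports):
-- (root, graph) from enumerate(parents), queryByNode from enumerate(queries).  Pre_
-- guarantees -n ≤ p < n and len(q) ≥ 2, -n ≤ q[0] < n, so the wrapped .getD accesses
-- below are exact on every admitted input (including Python's negative-index
-- wraparound, which pvWrap reproduces).
def pvSetup (parents : List Int) (queries : List (List Int)) :
    Int × Array (List Int) × Array (List (Int × Int)) :=
  let n := parents.length
  let rg := (PySem.List.enumerate parents).foldl
      (fun (rg : Int × Array (List Int)) ip =>
        if ip.2 == -1 then (ip.1, rg.2)
        else (rg.1, rg.2.modify (pvWrap n ip.2) (fun l => l ++ [ip.1])))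
      ((-1 : Int), Array.replicate n ([] : List Int))
  let qb := (PySem.List.enumerate queries).foldl
      (fun (qb : Array (List (Int × Int))) iq =>
        qb.modify (pvWrap n (iq.2.getD 0 0)) (fun l => l ++ [(iq.2.getD 1 0, iq.1)]))
      (Array.replicate n ([] : List (Int × Int)))
  (rg.1, rg.2, qb)

-- the enter-time work of A's dfs(u): trie.increase(u, 1) then answer queryByNode[u]
def pvVisit (qb : Array (List (Int × Int))) (u : Int) (s : PyTrie × Array Int) :
    PyTrie × Array Int :=
  let t := PyTrie.increase u 1 18 s.1
  (t, (qb.getD (pvWrap qb.size u) []).foldl (fun r vi => r.setIfInBounds vi.2.toNat (PyTrie.getMax vi.1 t)) s.2)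

-- A's recursive dfs.  Python's recursion is unbounded; the Nat fuel is only a
-- totality guard: it bounds the recursion DEPTH, and the top-level call passes n+1,
-- which Pre_'s rooted-acyclic condition makes sufficient (depth ≤ n-1 < n+1).
def pvDfs (g : Array (List Int)) (qb : Array (List (Int × Int))) :
    Nat → Int → PyTrie × Array Int → PyTrie × Array Int
  | 0, _, s => s
  | f+1, u, s =>
    let s1 := pvVisit qb u s
    let s2 := (g.getD (pvWrap g.size u) []).foldl (fun s v => pvDfs g qb f v s) s1
    (PyTrie.increase u (-1) 18 s2.1, s2.2)

def maxGeneticDifference (parents : List Int) (queries : List (List Int)) : List Int :=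
  let st := pvSetup parents queries
  (pvDfs st.2.1 st.2.2 (parents.length + 1) st.1
      (PyTrie.nil, Array.replicate queries.length (0 : Int))).2.toList

-- ===== PORT B =====

-- (val ^ a) & MASK with MASK = (1 << 18) - 1 = 262143
def pvXor18 (val a : Int) : Int := PySem.Int.band (PySem.Int.bxor val a) 262143

-- max((val ^ a) & MASK for a in anc)  (anc is never empty: it contains the node itself)
def pvMaxOver (val : Int) (anc : List Int) : Int :=
  match anc.map (fun a => pvXor18 val a) with
  | [] => 0
  | x :: xs => xs.foldl max x

-- B's dfs(u, anc): prepend u to the ancestor list, answer the queries at u by a direct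
-- scan of the list, recurse into the children with the extended list.  No exit step:
-- the ancestor list is passed down, never undone.  The Nat fuel is only a totality
-- guard for the recursion depth, as in port A.
def pvBDfs (g : Array (List Int)) (qb : Array (List (Int × Int))) :
    Nat → Int → List Int → Array Int → Array Int
  | 0, _, _, r => r
  | f+1, u, anc, r =>
    let anc' := u :: anc
    let r1 := (qb.getD (pvWrap qb.size u) []).foldl
        (fun r vi => r.setIfInBounds vi.2.toNat (pvMaxOver vi.1 anc')) r
    (g.getD (pvWrap g.size u) []).foldl (fun r v => pvBDfs g qb f v anc' r) r1

def maxGeneticDifference_alt (parents : List Int) (queries : List (List Int)) : List Int :=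
  let st := pvSetup parents queries
  (pvBDfs st.2.1 st.2.2 (parents.length + 1) st.1 []
      (Array.replicate queries.length (0 : Int))).toList

-- ===== PRECONDITION & SPEC =====
-- the node A starts its dfs from: the LAST index holding -1, or, when no entry is -1,
-- the pseudo-node -1 whose list accesses wrap to index n-1
def pvRootIdx (parents : List Int) : Int :=
  (PySem.List.enumerate parents).foldl (fun r ip => if ip.2 == -1 then ip.1 else r) (-1)

def pvStart (parents : List Int) : Nat := pvWrap parents.length (pvRootIdx parents)

-- walking UP the (wrapped) parent chain from u, do we avoid ever landing on s?
-- (if s lies on a parent cycle A's dfs re-enters it and recurses forever; any other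
-- cycle is unreachable from s, so A terminates)
def pvChainAvoid (parents : List Int) (s : Nat) : Nat → Nat → Bool
  | 0, _ => true
  | f+1, u =>
    let p := parents.getD u 0
    if p == -1 then true
    else
      let v := pvWrap parents.length p
      v != s && pvChainAvoid parents s f v

-- Pre_ = exactly the inputs on which Python A returns normally: a non-empty parents
-- list whose entries are usable indices (-n ≤ p < n; -1 marks the root), queries with
-- length ≥ 2 and a usable node index, and the start node not lying on a parent cycle
-- (on a cycle through the start, A's recursion never terminates: RecursionError).
def Pre_maxGeneticDifference (parents : List Int) (queries : List (List Int)) : Prop :=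
  0 < parents.length ∧
  (∀ p ∈ parents, -(parents.length : Int) ≤ p ∧ p < (parents.length : Int)) ∧
  (∀ q ∈ queries, 2 ≤ q.length ∧ -(parents.length : Int) ≤ q.getD 0 0 ∧
      q.getD 0 0 < (parents.length : Int)) ∧
  pvChainAvoid parents (pvStart parents) (parents.length + 1) (pvStart parents) = true
instance (parents : List Int) (queries : List (List Int)) : Decidable (Pre_maxGeneticDifference parents queries) := by unfold Pre_maxGeneticDifference; infer_instance

def pvWitness_maxGeneticDifference : List Int × List (List Int) :=
  ([-1, 0, 0], [[2, 3], [1, 5]])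

def Spec_maxGeneticDifference (parents : List Int) (queries : List (List Int)) (out : List Int) : Prop := out = maxGeneticDifference_alt parents queries
instance (parents : List Int) (queries : List (List Int)) (out : List Int) : Decidable (Spec_maxGeneticDifference parents queries out) := by unfold Spec_maxGeneticDifference; infer_instance

-- ===== CLAIM (what is proved, stated in full; the proofs are below) =====
def Claim_equal_maxGeneticDifference : Prop := ∀ (parents : List Int) (queries : List (List Int)), Dom_maxGeneticDifference parents queries → Pre_maxGeneticDifference parents queries → Spec_maxGeneticDifference parents queries (maxGeneticDifference parents queries)

-- ===== LEMMAS AND PROOFS =====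

-- ---- basic PyTrie accessors ----
theorem go_withChild (t : PyTrie) (b : Bool) (c : PyTrie) : (t.withChild b c).go = t.go := by
  cases t <;> cases b <;> rfl

theorem child_withChild (t : PyTrie) (b b' : Bool) (c : PyTrie) :
    (t.withChild b c).child b' = if b' = b then c else t.child b' := by
  cases t <;> cases b <;> cases b' <;> rfl

theorem go_addGo (t : PyTrie) (d : Int) : (t.addGo d).go = t.go + d := by
  cases t <;> simp [PyTrie.addGo, PyTrie.go]

theorem child_addGo (t : PyTrie) (d : Int) (b : Bool) : (t.addGo d).child b = t.child b := by
  cases t <;> cases b <;> rfl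

theorem go_increase (x d : Int) (k : Nat) (t : PyTrie) :
    (PyTrie.increase x d k t).go = t.go := by
  cases k with
  | zero => rfl
  | succ k => simp [PyTrie.increase, go_withChild]

-- ---- the abstraction relation: the subtrie t represents the multiset L of numbers,
-- looking only at their k lowest relevant bits ----
def TRepr : Nat → PyTrie → List Int → Prop
  | 0, _, _ => True
  | k+1, t, L => ∀ b : Bool,
      (t.child b).go = ((L.filter (fun x => pyBit x k == b)).length : Int)
      ∧ TRepr k (t.child b) (L.filter (fun x => pyBit x k == b))

theorem TRepr_addGo (k : Nat) (t : PyTrie) (d : Int) (L : List Int) :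
    TRepr k (t.addGo d) L ↔ TRepr k t L := by
  cases k with
  | zero => simp [TRepr]
  | succ k => simp [TRepr, child_addGo]

theorem TRepr_nil (k : Nat) : TRepr k PyTrie.nil [] := by
  induction k with
  | zero => trivial
  | succ k ih => intro b; exact ⟨by simp [PyTrie.child, PyTrie.go], by simpa [PyTrie.child] using ih⟩

theorem TRepr_insert (x : Int) : ∀ (k : Nat) (t : PyTrie) (L : List Int),
    TRepr k t L → TRepr k (PyTrie.increase x 1 k t) (x :: L) := by
  intro k
  induction k with
  | zero => intro t L _; trivial
  | succ k ih =>
    intro t L h b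
    have hch : (PyTrie.increase x 1 (k+1) t).child b
        = if b = pyBit x k then PyTrie.increase x 1 k ((t.child (pyBit x k)).addGo 1)
          else t.child b := by
      simp [PyTrie.increase, child_withChild]
    by_cases hb : b = pyBit x k
    · rw [hch, if_pos hb, ← hb]
      have hf : (x :: L).filter (fun y => pyBit y k == b) = x :: L.filter (fun y => pyBit y k == b) := by
        rw [List.filter_cons, if_pos (by simp [hb])]
      rw [hf]
      constructor
      · rw [go_increase, go_addGo, (h b).1]; simp only [List.length_cons]; push_cast; ring
      · exact ih _ _ (((TRepr_addGo k (t.child b) 1 _)).2 (h b).2)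
    · rw [hch, if_neg hb]
      have hf : (x :: L).filter (fun y => pyBit y k == b) = L.filter (fun y => pyBit y k == b) := by
        rw [List.filter_cons, if_neg (by simp only [beq_iff_eq]; exact fun hx => hb hx.symm)]
      rw [hf]
      exact h b

theorem TRepr_remove (x : Int) : ∀ (k : Nat) (t : PyTrie) (L : List Int),
    TRepr k t (x :: L) → TRepr k (PyTrie.increase x (-1) k t) L := by
  intro k
  induction k with
  | zero => intro t L _; trivial
  | succ k ih =>
    intro t L h b
    have hch : (PyTrie.increase x (-1) (k+1) t).child b
        = if b = pyBit x k then PyTrie.increase x (-1) k ((t.child (pyBit x k)).addGo (-1))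
          else t.child b := by
      simp [PyTrie.increase, child_withChild]
    by_cases hb : b = pyBit x k
    · rw [hch, if_pos hb, ← hb]
      have hf : (x :: L).filter (fun y => pyBit y k == b) = x :: L.filter (fun y => pyBit y k == b) := by
        rw [List.filter_cons, if_pos (by simp [hb])]
      constructor
      · rw [go_increase, go_addGo]
        have := (h b).1; rw [hf] at this; rw [this]; simp only [List.length_cons]; push_cast; ring
      · have h2 : TRepr k ((t.child b).addGo (-1)) (x :: L.filter (fun y => pyBit y k == b)) := by
          rw [TRepr_addGo]
          have := (h b).2; rw [hf] at this; exact this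
        exact ih _ _ h2
    · rw [hch, if_neg hb]
      have hf : (x :: L).filter (fun y => pyBit y k == b) = L.filter (fun y => pyBit y k == b) := by
        rw [List.filter_cons, if_neg (by simp only [beq_iff_eq]; exact fun hx => hb hx.symm)]
      have := h b; rw [hf] at this; exact this

-- ---- the value both programs compute per (query value, ancestor): the XOR of the
-- low 18 bits, written bit by bit ----
def xorLow : Nat → Int → Int → Int
  | 0, _, _ => 0
  | k+1, val, a => (if pyBit val k != pyBit a k then (2:Int)^k else 0) + xorLow k val a

theorem xorLow_nonneg (val a : Int) : ∀ k, 0 ≤ xorLow k val a := by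
  intro k; induction k with
  | zero => simp [xorLow]
  | succ k ih =>
    have h2 : (0:Int) ≤ 2^k := by positivity
    simp only [xorLow]; split <;> linarith

theorem xorLow_lt (val a : Int) : ∀ k, xorLow k val a < 2^k := by
  intro k; induction k with
  | zero => simp [xorLow]
  | succ k ih =>
    have h2 : (0:Int) < 2^k := by positivity
    have : (2:Int)^(k+1) = 2^k + 2^k := by ring
    simp only [xorLow]; split <;> linarith

-- ---- greedy getMax = maximum of xorLow over the represented multiset ----
theorem getMaxAux_spec (val : Int) : ∀ (k : Nat) (t : PyTrie) (L : List Int) (ans : Int),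
    TRepr k t L → L ≠ [] →
    (∃ x ∈ L, PyTrie.getMaxAux val k t ans = ans + xorLow k val x) ∧
    (∀ x ∈ L, ans + xorLow k val x ≤ PyTrie.getMaxAux val k t ans) := by
  intro k
  induction k with
  | zero =>
    intro t L ans _ hne
    rcases List.exists_mem_of_ne_nil L hne with ⟨x, hx⟩
    exact ⟨⟨x, hx, by simp [PyTrie.getMaxAux, xorLow]⟩,
           fun y _ => by simp [PyTrie.getMaxAux, xorLow]⟩
  | succ k ih =>
    intro t L ans h hne
    have hsplit : ∀ x ∈ L, x ∈ L.filter (fun y => pyBit y k == pyBit x k) := by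
      intro x hx; exact List.mem_filter.2 ⟨hx, by simp⟩
    set b := pyBit val k with hbdef
    have hgo := (h (!b)).1
    have hxl : ∀ (x : Int) (bx : Bool), pyBit x k = bx →
        xorLow (k+1) val x = (if b != bx then (2:Int)^k else 0) + xorLow k val x := by
      intro x bx hbx; simp [xorLow, hbx, hbdef]
    have hstep : PyTrie.getMaxAux val (k+1) t ans
        = if (t.child (!b)).go > 0
          then PyTrie.getMaxAux val k (t.child (!b)) ((2:Int)^k + ans)
          else PyTrie.getMaxAux val k (t.child b) ans := by
      simp [PyTrie.getMaxAux, hbdef]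
    by_cases hpos : (t.child (!b)).go > 0
    · rw [hstep, if_pos hpos]
      have hne' : L.filter (fun y => pyBit y k == !b) ≠ [] := by
        intro hemp
        rw [hemp] at hgo; simp at hgo; omega
      obtain ⟨hex, hub⟩ := ih (t.child (!b)) _ ((2:Int)^k + ans) (h (!b)).2 hne'
      constructor
      · obtain ⟨x, hx, hvx⟩ := hex
        have hxb : pyBit x k = !b := by simpa using (List.mem_filter.1 hx).2
        refine ⟨x, (List.mem_filter.1 hx).1, ?_⟩
        rw [hvx, hxl x (!b) hxb]
        simp [show (b != !b) = true by simp]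
        ring
      · intro x hx
        by_cases hxb : pyBit x k = !b
        · have := hub x (List.mem_filter.2 ⟨hx, by simp [hxb]⟩)
          rw [hxl x (!b) hxb]
          simp [show (b != !b) = true by simp]
          linarith
        · have hxb' : pyBit x k = b := by
            cases hb : pyBit x k <;> cases hbb : b <;> simp_all
          rw [hxl x b hxb']
          simp
          obtain ⟨x0, hx0, hv0⟩ := hex
          have hlt := xorLow_lt val x k
          have hnn := xorLow_nonneg val x0 k
          rw [hv0]
          linarith
    · rw [hstep, if_neg hpos]
      have hall : ∀ x ∈ L, pyBit x k = b := by
        intro x hx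
        by_contra hxb
        have hxb' : pyBit x k = !b := by
          cases hb : pyBit x k <;> cases hbb : b <;> simp_all
        have : x ∈ L.filter (fun y => pyBit y k == !b) := List.mem_filter.2 ⟨hx, by simp [hxb']⟩
        have hlen : 0 < (L.filter (fun y => pyBit y k == !b)).length := List.length_pos_of_mem this
        rw [hgo] at hpos; omega
      have hfe : L.filter (fun y => pyBit y k == b) = L := by
        apply List.filter_eq_self.2
        intro x hx; simp [hall x hx]
      obtain ⟨hex, hub⟩ := ih (t.child b) _ ans (h b).2 (by rw [hfe]; exact hne)
      rw [hfe] at hex hub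
      constructor
      · obtain ⟨x, hx, hvx⟩ := hex
        refine ⟨x, hx, ?_⟩
        rw [hvx, hxl x b (hall x hx)]
        simp
      · intro x hx
        have := hub x hx
        rw [hxl x b (hall x hx)]
        simp
        linarith

-- ---- the bit bridge: (val ^ a) & 0x3FFFF = xorLow 18 val a ----
theorem pyBit_div_mod (z : Int) (i : Nat) :
    pyBit z i = decide ((PySem.Int.floordiv z ((2:Int)^i)) % 2 = 1) := by
  rw [pyBit, PySem.Int.band_one, PySem.Int.mod_eq_emod_of_pos (by norm_num : (0:Int) < 2)]
  rfl

theorem pyBit_nonneg (z : Int) (hz : 0 ≤ z) (i : Nat) : pyBit z i = z.toNat.testBit i := by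
  rw [pyBit_div_mod]
  have h1 : PySem.Int.floordiv z ((2:Int)^i) = ((z.toNat / 2^i : Nat) : Int) := by
    have h2 := PySem.Int.floordiv_natCast z.toNat (2^i)
    simp only [Nat.cast_pow, Nat.cast_ofNat] at h2
    rwa [Int.toNat_of_nonneg hz] at h2
  rw [h1, Nat.testBit_eq_decide_div_mod_eq]
  simp only [decide_eq_decide]
  omega

theorem pyBit_neg (z : Int) (hz : z < 0) (i : Nat) : pyBit z i = !((-z-1).toNat.testBit i) := by
  have hw : ((-z-1).toNat : Int) = -z-1 := Int.toNat_of_nonneg (by omega)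
  set w : Nat := (-z-1).toNat with hwdef
  have hD : (0:Int) < (2:Int)^i := by positivity
  have hdm := Nat.div_add_mod w (2^i)
  have hmod : w % 2^i < 2^i := Nat.mod_lt _ (by positivity)
  have hdmZ : ((2:Int))^i * ((w / 2^i : Nat) : Int) + ((w % 2^i : Nat) : Int) = (w : Int) := by
    exact_mod_cast congrArg (fun n : Nat => (n : Int)) hdm
  have hmodZ : ((w % 2^i : Nat) : Int) < (2:Int)^i := by exact_mod_cast hmod
  have h1 : PySem.Int.floordiv z ((2:Int)^i) = -((w / 2^i : Nat) : Int) - 1 := by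
    rw [PySem.Int.floordiv_eq_iff_of_pos hD]
    constructor
    · nlinarith [hdmZ, hmodZ, hw]
    · nlinarith [hdmZ, hmodZ, hw]
  rw [pyBit_div_mod, h1, Nat.testBit_eq_decide_div_mod_eq]
  by_cases hp : w / 2^i % 2 = 1
  · simp only [hp, decide_true, Bool.not_true, decide_eq_false_iff_not]
    omega
  · simp only [hp, decide_false, Bool.not_false, decide_eq_true_eq]
    omega

-- the same maximum, computed over plain Nats bit by bit
def natXL (x y : Nat) : Nat → Nat
  | 0 => 0
  | k+1 => (if x.testBit k != y.testBit k then 2^k else 0) + natXL x y k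

theorem natXL_eq_mod (x y : Nat) : ∀ k, (x ^^^ y) % 2^k = natXL x y k := by
  intro k
  induction k with
  | zero => simp [natXL, Nat.mod_one]
  | succ k ih =>
    have hsplit : (x^^^y) % 2^(k+1) = (x^^^y) % 2^k + 2^k * ((x^^^y) / 2^k % 2) := by
      rw [pow_succ]; exact Nat.mod_mul
    have ht := Nat.testBit_xor x y k
    rw [Nat.testBit_eq_decide_div_mod_eq] at ht
    have hq : (x^^^y) / 2^k % 2 = if (x.testBit k != y.testBit k) then 1 else 0 := by
      cases hx : x.testBit k <;> cases hy : y.testBit k <;>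
        rw [hx, hy] at ht <;> simp only [Bool.xor_false, Bool.xor_true, Bool.not_false,
          Bool.not_true, decide_eq_true_eq, decide_eq_false_iff_not] at ht <;>
        simp <;> omega
    show (x^^^y) % 2^(k+1) = (if x.testBit k != y.testBit k then 2^k else 0) + natXL x y k
    rw [hsplit, ih, hq]
    cases h : (x.testBit k != y.testBit k)
    · simp
    · simp
      ring

theorem natXL_eq_mod262144 (x y : Nat) : (x ^^^ y) % 262144 = natXL x y 18 := by
  have h : (262144 : Nat) = 2^18 := by norm_num
  rw [h]
  exact natXL_eq_mod x y 18

theorem xorLow_eq_natXL (val a : Int) (x y : Nat)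
    (hb : ∀ i, (pyBit val i != pyBit a i) = (x.testBit i != y.testBit i)) :
    ∀ k, xorLow k val a = ((natXL x y k : Nat) : Int) := by
  intro k
  induction k with
  | zero => simp [xorLow, natXL]
  | succ k ih =>
    simp only [xorLow, natXL, hb k]
    cases h : (x.testBit k != y.testBit k) <;> simp [ih]

theorem xorLow_add_natXL (val a : Int) (x y : Nat)
    (hb : ∀ i, (pyBit val i != pyBit a i) = !(x.testBit i != y.testBit i)) :
    ∀ k, xorLow k val a + ((natXL x y k : Nat) : Int) = 2^k - 1 := by
  intro k
  induction k with
  | zero => simp [xorLow, natXL]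
  | succ k ih =>
    have h2 : ((2:Int))^(k+1) = 2^k + 2^k := by ring
    simp only [xorLow, natXL, hb k]
    cases h : (x.testBit k != y.testBit k) <;> simp <;> linarith

theorem band_neg_mask (m : Nat) :
    PySem.Int.band (-((m:Nat):Int) - 1) 262143 = ((262143 - m % 262144 : Nat) : Int) := by
  rw [PySem.Int.band.eq_1, if_neg (by omega : ¬ (0:Int) ≤ -(m:Int) - 1),
      if_pos (by norm_num : (0:Int) ≤ 262143)]
  have h1 : ((262143:Int)).toNat = 262143 := rfl
  have h2 : (-(-(m:Int) - 1) - 1).toNat = m := by omega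
  rw [h1, h2, Nat.and_comm]
  have h3 : m &&& 262143 = m % 262144 := by
    have := Nat.and_two_pow_sub_one_eq_mod m 18; norm_num at this; exact this
  rw [h3]

theorem band_pos_mask (m : Nat) :
    PySem.Int.band ((m:Nat):Int) 262143 = ((m % 262144 : Nat) : Int) := by
  have h0 : (262143 : Int) = ((262143:Nat):Int) := by norm_num
  rw [h0, PySem.Int.band_natCast]
  have h3 : m &&& 262143 = m % 262144 := by
    have := Nat.and_two_pow_sub_one_eq_mod m 18; norm_num at this; exact this
  rw [h3]

theorem natXL18_le (x y : Nat) : natXL x y 18 ≤ 262143 := by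
  have := natXL_eq_mod x y 18
  have h : (x ^^^ y) % 2^18 < 2^18 := Nat.mod_lt _ (by norm_num)
  omega

theorem pvXor18_eq_xorLow (val a : Int) : pvXor18 val a = xorLow 18 val a := by
  unfold pvXor18
  by_cases hv : 0 ≤ val <;> by_cases ha : 0 ≤ a
  · -- both nonnegative
    have hx : PySem.Int.bxor val a = (((val.toNat ^^^ a.toNat : Nat)):Int) := by
      rw [PySem.Int.bxor.eq_1, if_pos hv, if_pos ha]
    rw [hx, band_pos_mask]
    have hm : (val.toNat ^^^ a.toNat) % 262144 = natXL val.toNat a.toNat 18 := natXL_eq_mod262144 _ _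
    rw [hm]
    exact (xorLow_eq_natXL val a val.toNat a.toNat
      (fun i => by rw [pyBit_nonneg val hv i, pyBit_nonneg a ha i]) 18).symm
  · -- val ≥ 0, a < 0
    have hx : PySem.Int.bxor val a = -(((val.toNat ^^^ (-a-1).toNat : Nat)):Int) - 1 := by
      rw [PySem.Int.bxor.eq_1, if_pos hv, if_neg ha]
    rw [hx, band_neg_mask]
    have hm : (val.toNat ^^^ (-a-1).toNat) % 262144 = natXL val.toNat (-a-1).toNat 18 := natXL_eq_mod262144 _ _
    have hle := natXL18_le val.toNat (-a-1).toNat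
    have hXL := xorLow_add_natXL val a val.toNat (-a-1).toNat
      (fun i => by
        rw [pyBit_nonneg val hv i, pyBit_neg a (by omega) i]
        cases val.toNat.testBit i <;> cases ((-a-1).toNat.testBit i) <;> rfl) 18
    rw [hm]
    have hcast : (((262143 - natXL val.toNat (-a-1).toNat 18 : Nat)):Int)
        = 262143 - ((natXL val.toNat (-a-1).toNat 18 : Nat) : Int) := by omega
    rw [hcast]
    have hp : ((2:Int))^18 = 262144 := by norm_num
    linarith
  · -- val < 0, a ≥ 0
    have hx : PySem.Int.bxor val a = -(((( -val-1).toNat ^^^ a.toNat : Nat)):Int) - 1 := by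
      rw [PySem.Int.bxor.eq_1, if_neg hv, if_pos ha]
    rw [hx, band_neg_mask]
    have hm : ((-val-1).toNat ^^^ a.toNat) % 262144 = natXL (-val-1).toNat a.toNat 18 := natXL_eq_mod262144 _ _
    have hle := natXL18_le (-val-1).toNat a.toNat
    have hXL := xorLow_add_natXL val a (-val-1).toNat a.toNat
      (fun i => by
        rw [pyBit_neg val (by omega) i, pyBit_nonneg a ha i]
        cases ((-val-1).toNat.testBit i) <;> cases a.toNat.testBit i <;> rfl) 18
    rw [hm]
    have hcast : (((262143 - natXL (-val-1).toNat a.toNat 18 : Nat)):Int)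
        = 262143 - ((natXL (-val-1).toNat a.toNat 18 : Nat) : Int) := by omega
    rw [hcast]
    have hp : ((2:Int))^18 = 262144 := by norm_num
    linarith
  · -- both negative
    have hx : PySem.Int.bxor val a = ((((-val-1).toNat ^^^ (-a-1).toNat : Nat)):Int) := by
      rw [PySem.Int.bxor.eq_1, if_neg hv, if_neg ha]
    rw [hx, band_pos_mask]
    have hm : ((-val-1).toNat ^^^ (-a-1).toNat) % 262144 = natXL (-val-1).toNat (-a-1).toNat 18 := natXL_eq_mod262144 _ _
    rw [hm]
    exact (xorLow_eq_natXL val a (-val-1).toNat (-a-1).toNat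
      (fun i => by
        rw [pyBit_neg val (by omega) i, pyBit_neg a (by omega) i]
        cases ((-val-1).toNat.testBit i) <;> cases ((-a-1).toNat.testBit i) <;> rfl) 18).symm

-- ---- foldl max over a nonempty list: membership and upper bound ----
theorem foldl_max_ge : ∀ (L : List Int) (i : Int), i ≤ L.foldl max i ∧ ∀ y ∈ L, y ≤ L.foldl max i := by
  intro L
  induction L with
  | nil => simp
  | cons z L ih =>
    intro i
    refine ⟨le_trans (le_max_left i z) (ih (max i z)).1, ?_⟩
    intro y hy
    rcases List.mem_cons.1 hy with h | h
    · subst h; exact le_trans (le_max_right i y) (ih (max i y)).1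
    · exact (ih (max i z)).2 y h

theorem foldl_max_mem : ∀ (L : List Int) (i : Int), L.foldl max i = i ∨ L.foldl max i ∈ L := by
  intro L
  induction L with
  | nil => intro i; left; rfl
  | cons z L ih =>
    intro i
    rcases ih (max i z) with h | h
    · rcases max_choice i z with hm | hm
      · left; show List.foldl max (max i z) L = i; rw [h, hm]
      · right; refine List.mem_cons.2 (Or.inl ?_)
        show List.foldl max (max i z) L = z; rw [h, hm]
    · right; exact List.mem_cons.2 (Or.inr h)

-- ---- A's getMax on a trie representing the ancestor list = B's direct scan ----
theorem getMax_eq_maxOver (val u : Int) (anc : List Int) (t : PyTrie)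
    (h : TRepr 18 t (u :: anc)) : PyTrie.getMax val t = pvMaxOver val (u :: anc) := by
  obtain ⟨⟨x, hx, hvx⟩, hub⟩ :=
    getMaxAux_spec val 18 t (u :: anc) 0 h (List.cons_ne_nil u anc)
  have hmap : (fun a => pvXor18 val a) = fun a => xorLow 18 val a := by
    funext a; exact pvXor18_eq_xorLow val a
  have hM : pvMaxOver val (u :: anc)
      = (anc.map (fun a => xorLow 18 val a)).foldl max (xorLow 18 val u) := by
    simp [pvMaxOver, hmap]
  have hMub : ∀ y ∈ u :: anc, xorLow 18 val y ≤ pvMaxOver val (u :: anc) := by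
    intro y hy
    rw [hM]
    rcases List.mem_cons.1 hy with hyu | hya
    · subst hyu; exact (foldl_max_ge _ _).1
    · exact (foldl_max_ge _ _).2 _ (List.mem_map.2 ⟨y, hya, rfl⟩)
  have hMmem : ∃ y ∈ u :: anc, pvMaxOver val (u :: anc) = xorLow 18 val y := by
    rw [hM]
    rcases foldl_max_mem (anc.map (fun a => xorLow 18 val a)) (xorLow 18 val u) with hm | hm
    · exact ⟨u, List.mem_cons_self, hm⟩
    · obtain ⟨y, hy, hyv⟩ := List.mem_map.1 hm
      exact ⟨y, List.mem_cons.2 (Or.inr hy), hyv.symm⟩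
  obtain ⟨y, hy, hyv⟩ := hMmem
  have h1 : PyTrie.getMax val t ≤ pvMaxOver val (u :: anc) := by
    rw [PyTrie.getMax, hvx, zero_add]; exact hMub x hx
  have h2 : pvMaxOver val (u :: anc) ≤ PyTrie.getMax val t := by
    rw [hyv, PyTrie.getMax]
    have := hub y hy; linarith
  exact le_antisymm h1 h2

-- ---- the simulation: A's dfs with the trie ≍ B's dfs with the ancestor list ----
theorem sim (g : Array (List Int)) (qb : Array (List (Int × Int))) :
    ∀ (f : Nat) (u : Int) (anc : List Int) (s : PyTrie × Array Int), TRepr 18 s.1 anc →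
      TRepr 18 (pvDfs g qb f u s).1 anc ∧
      (pvDfs g qb f u s).2 = pvBDfs g qb f u anc s.2 := by
  intro f
  induction f with
  | zero => intro u anc s h; exact ⟨h, rfl⟩
  | succ f ih =>
    intro u anc s h
    have h1 : TRepr 18 (PyTrie.increase u 1 18 s.1) (u :: anc) := TRepr_insert u 18 s.1 anc h
    have hfun : (fun (r : Array Int) (vi : Int × Int) =>
          r.setIfInBounds vi.2.toNat (PyTrie.getMax vi.1 (PyTrie.increase u 1 18 s.1)))
        = fun r vi => r.setIfInBounds vi.2.toNat (pvMaxOver vi.1 (u :: anc)) := by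
      funext r vi; rw [getMax_eq_maxOver vi.1 u anc _ h1]
    have aux : ∀ (Lc : List Int) (s' : PyTrie × Array Int), TRepr 18 s'.1 (u :: anc) →
        TRepr 18 ((Lc.foldl (fun s v => pvDfs g qb f v s) s').1) (u :: anc) ∧
        (Lc.foldl (fun s v => pvDfs g qb f v s) s').2
          = Lc.foldl (fun r v => pvBDfs g qb f v (u :: anc) r) s'.2 := by
      intro Lc
      induction Lc with
      | nil => intro s' h'; exact ⟨h', rfl⟩
      | cons v Lc ihL =>
        intro s' h'
        obtain ⟨ha, hb⟩ := ih v (u :: anc) s' h'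
        obtain ⟨hc, hd⟩ := ihL (pvDfs g qb f v s') ha
        exact ⟨hc, by simp only [List.foldl_cons, hd, hb]⟩
    have hvis1 : (pvVisit qb u s).1 = PyTrie.increase u 1 18 s.1 := rfl
    obtain ⟨ha, hb⟩ := aux (g.getD (pvWrap g.size u) []) (pvVisit qb u s) (by rw [hvis1]; exact h1)
    have hvis2 : (pvVisit qb u s).2
        = (qb.getD (pvWrap qb.size u) []).foldl
            (fun r vi => r.setIfInBounds vi.2.toNat (pvMaxOver vi.1 (u :: anc))) s.2 := by
      show (qb.getD (pvWrap qb.size u) []).foldl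
            (fun r vi => r.setIfInBounds vi.2.toNat (PyTrie.getMax vi.1 (PyTrie.increase u 1 18 s.1))) s.2 = _
      rw [hfun]
    constructor
    · show TRepr 18 (PyTrie.increase u (-1) 18
          ((g.getD (pvWrap g.size u) []).foldl (fun s v => pvDfs g qb f v s) (pvVisit qb u s)).1) anc
      exact TRepr_remove u 18 _ anc ha
    · show ((g.getD (pvWrap g.size u) []).foldl (fun s v => pvDfs g qb f v s) (pvVisit qb u s)).2
          = pvBDfs g qb (f+1) u anc s.2
      rw [hb, hvis2]
      rfl

-- ===== VERDICT (by name: the statement is the Claim_ definition above) =====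
theorem maxGeneticDifference_spec : Claim_equal_maxGeneticDifference := by
  intro parents queries _ _
  unfold Spec_maxGeneticDifference maxGeneticDifference maxGeneticDifference_alt
  have h := sim (pvSetup parents queries).2.1 (pvSetup parents queries).2.2
      (parents.length + 1) (pvSetup parents queries).1 []
      (PyTrie.nil, Array.replicate queries.length (0 : Int)) (TRepr_nil 18)
  simp only [h.2]
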